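-- pv_equiv track=rewrite | github.com/abdirahmanfarah/Practice-Code-Reviews | Python/challenge.py | fun_challenge
-- ===== SOURCE A (Python) =====
-- def fun_challenge(mat):
--     # Your code here.
--     allowed_nums = {}
--     row_length = len(mat[0]) + 1
--     reset_array = []
--     t = []
--     for i in range(1, row_length):
--         t.append(i)
--
--     for row in mat:
--         allowed_nums = {i: 1 for i in t}
--
--         for column in row:
--             if column in allowed_nums and column in allowed_nums != 0:
--
--                 allowed_nums[column] -= 1
--             else:
--                 return 'INVALID'
--
--         check_dict = all(x == 0 for x in allowed_nums.values())
--         if check_dict != True: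
--             return 'INVALID'
--
--     column_to_row = list(map(list, zip(*mat)))
--
--     for row in column_to_row:
--         allowed_nums = {i: 1 for i in t}
--
--         for column in row:
--
--             if column in allowed_nums and column in allowed_nums != 0:
--                 allowed_nums[column] -= 1
--             else:
--                 return 'INVALID'
--
--         check_dict = all(x == 0 for x in allowed_nums.values())
--
--         if check_dict != True:
--             return 'INVALID'
--
--     return 'VALID'
-- ===== SOURCE B (Python) =====
-- def fun_challenge(mat):
--     expected = list(range(1, len(mat[0]) + 1))
--     rows_ok = all(sorted(row) == expected for row in mat)
--     cols_ok = all(sorted(col) == expected for col in zip(*mat))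
--     return 'VALID' if rows_ok and cols_ok else 'INVALID'
-- ===== Notes on version B (the rewrite author's own statement) =====
-- stated objective: simpler
-- what changed: Replaces A's per-row dict comprehension, membership/decrement inner loop and all-zero value scan with a single sorted(row) == list(range(1, n+1)) comparison applied to each row and each column of the transpose.
import Mathlib
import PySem

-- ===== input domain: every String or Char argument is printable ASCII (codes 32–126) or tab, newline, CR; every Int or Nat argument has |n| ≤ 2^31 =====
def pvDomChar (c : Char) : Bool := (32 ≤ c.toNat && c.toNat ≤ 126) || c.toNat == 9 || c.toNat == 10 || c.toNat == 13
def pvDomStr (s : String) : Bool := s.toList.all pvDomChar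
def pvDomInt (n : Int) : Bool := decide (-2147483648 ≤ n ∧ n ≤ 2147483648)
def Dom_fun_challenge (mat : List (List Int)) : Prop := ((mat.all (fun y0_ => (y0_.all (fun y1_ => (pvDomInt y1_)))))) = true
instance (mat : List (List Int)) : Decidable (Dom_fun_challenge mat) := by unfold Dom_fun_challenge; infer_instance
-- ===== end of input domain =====

-- B replaces A's per-row dict-decrement bookkeeping by comparing sorted(row) with the expected
-- sequence 1..n (objective: simpler). Equivalence is about the return value on nonempty matrices.

-- ===== PORT A =====
-- the dict comprehension '{i: 1 for i in t}'
def fcDict (t : List Int) : PySem.Dict Int Int :=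
  t.foldl (fun d i => d.insert i 1) PySem.Dict.empty

-- A's inner 'for column in row' loop.  The Python condition
-- 'column in allowed_nums and column in allowed_nums != 0' is a chained comparison:
-- it means '(column in allowed_nums) and (column in allowed_nums) and (allowed_nums != 0)',
-- and a dict never equals 0, so it reduces to 'column in allowed_nums'.  none = early 'return'.
def fcInner (allowed : PySem.Dict Int Int) (row : List Int) : Option (PySem.Dict Int Int) :=
  match row with
  | [] => some allowed
  | c :: rest =>
    if allowed.contains c then fcInner (allowed.modify c 0 (· - 1)) rest
    else none

-- A's 'for row in mat' loop (used again for the transposed matrix); some s = early return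
def fcRowsCheck (t : List Int) (rows : List (List Int)) : Option String :=
  match rows with
  | [] => none
  | row :: rest =>
    match fcInner (fcDict t) row with
    | none => some "INVALID"
    | some d =>
      let check_dict := d.values.all (fun x => x == 0)
      if check_dict != true then some "INVALID" else fcRowsCheck t rest

-- 'list(map(list, zip(*mat)))': zip truncates every column to the shortest row
def pyZipStar (rows : List (List Int)) : List (List Int) :=
  match rows with
  | [] => []
  | _ :: _ =>
    (List.range ((rows.map List.length).min?.getD 0)).map
      (fun j => rows.map (fun r => r.getD j 0))

def fun_challenge (mat : List (List Int)) : String :=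
  -- 'len(mat[0]) + 1'; mat[0] raises IndexError on [] (excluded by Pre_)
  let row_length : Int := (((PySem.List.pyGet? mat 0).getD []).length : Int) + 1
  -- the loop 'for i in range(1, row_length): t.append(i)'
  let t := (PySem.List.pyRange 1 row_length 1).foldl (fun acc i => acc ++ [i]) []
  match fcRowsCheck t mat with
  | some s => s
  | none =>
    let column_to_row := pyZipStar mat
    match fcRowsCheck t column_to_row with
    | some s => s
    | none => "VALID"

-- ===== PORT B =====
def fun_challenge_alt (mat : List (List Int)) : String :=
  let row_length : Int := (((PySem.List.pyGet? mat 0).getD []).length : Int) + 1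
  let expected := PySem.List.pyRange 1 row_length 1
  let rows_ok := mat.all (fun row => PySem.List.sorted row (fun x => x) == expected)
  let cols_ok := (pyZipStar mat).all (fun col => PySem.List.sorted col (fun x => x) == expected)
  if rows_ok && cols_ok then "VALID" else "INVALID"

-- ===== PRECONDITION & SPEC =====
-- Pre_ excludes only the empty matrix, on which the Python A raises IndexError at mat[0]
-- (B raises the same way there).
def Pre_fun_challenge (mat : List (List Int)) : Prop := mat ≠ []
instance (mat : List (List Int)) : Decidable (Pre_fun_challenge mat) := by
  unfold Pre_fun_challenge; infer_instance

def pvWitness_fun_challenge : List (List Int) := [[1, 2], [2, 1]]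

def Spec_fun_challenge (mat : List (List Int)) (out : String) : Prop := out = fun_challenge_alt mat
instance (mat : List (List Int)) (out : String) : Decidable (Spec_fun_challenge mat out) := by
  unfold Spec_fun_challenge; infer_instance

-- ===== CLAIM (what is proved, stated in full; the proofs are below) =====
def Claim_equal_fun_challenge : Prop := ∀ (mat : List (List Int)), Dom_fun_challenge mat → Pre_fun_challenge mat → Spec_fun_challenge mat (fun_challenge mat)

-- ===== LEMMAS AND PROOFS =====

-- the dict comprehension: lookup and membership
lemma getD_fcDict_aux (t : List Int) (d : PySem.Dict Int Int) (k : Int) :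
    (t.foldl (fun d i => d.insert i 1) d).getD k 0 = if k ∈ t then 1 else d.getD k 0 := by
  induction t generalizing d with
  | nil => simp
  | cons a t ih =>
    simp only [List.foldl_cons, ih, PySem.Dict.getD_insert, List.mem_cons]
    by_cases h1 : k ∈ t <;> by_cases h2 : k = a <;> simp [h1, h2]

lemma contains_fcDict_aux (t : List Int) (d : PySem.Dict Int Int) (k : Int) :
    (t.foldl (fun d i => d.insert i 1) d).contains k = (decide (k ∈ t) || d.contains k) := by
  induction t generalizing d with
  | nil => simp
  | cons a t ih =>
    simp only [List.foldl_cons, ih, PySem.Dict.contains_insert, List.mem_cons]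
    by_cases h1 : k ∈ t <;> by_cases h2 : k = a <;> simp [h1, h2]

lemma contains_fcDict (t : List Int) (k : Int) :
    (fcDict t).contains k = decide (k ∈ t) := by
  simp [fcDict, contains_fcDict_aux]

lemma getD_fcDict (t : List Int) (k : Int) :
    (fcDict t).getD k 0 = if k ∈ t then 1 else 0 := by
  simp [fcDict, getD_fcDict_aux]

-- the decrement loop: lookup, membership
lemma getD_foldl_sub (l : List Int) (d : PySem.Dict Int Int) (k : Int) :
    (l.foldl (fun d x => d.modify x 0 (· - 1)) d).getD k 0 = d.getD k 0 - l.count k := by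
  induction l generalizing d with
  | nil => simp
  | cons a l ih =>
    simp only [List.foldl_cons, ih, PySem.Dict.getD_modify, List.count_cons]
    by_cases h : k = a
    · simp [h]
      ring
    · simp [h, Ne.symm h]

lemma contains_foldl_sub (l : List Int) (d : PySem.Dict Int Int) (k : Int) :
    (l.foldl (fun d x => d.modify x 0 (· - 1)) d).contains k = (decide (k ∈ l) || d.contains k) := by
  induction l generalizing d with
  | nil => simp
  | cons a l ih =>
    simp only [List.foldl_cons, ih, PySem.Dict.contains_modify, List.mem_cons]
    by_cases h1 : k ∈ l <;> by_cases h2 : k = a <;> simp [h1, h2]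

-- fcInner in closed form
lemma fcInner_eq (d : PySem.Dict Int Int) (row : List Int) :
    fcInner d row =
      if row.all (fun c => d.contains c)
      then some (row.foldl (fun d c => d.modify c 0 (· - 1)) d)
      else none := by
  induction row generalizing d with
  | nil => simp [fcInner]
  | cons c rest ih =>
    simp only [fcInner, List.all_cons, List.foldl_cons]
    by_cases hc : d.contains c = true
    · have hsame : ∀ x, (d.modify c 0 (· - 1)).contains x = d.contains x := by
        intro x
        rw [PySem.Dict.contains_modify]
        by_cases hx : x = c
        · simp [hx, hc]
        · simp [hx]
      simp only [hc, if_true, ih, hsame, Bool.true_and]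
    · simp [hc]

-- a row passes A's check exactly when it is a permutation of t = 1..n
lemma perm_iff (n : Int) (row : List Int) :
    (row.all (fun c => decide (c ∈ PySem.List.pyRange 1 n 1)) = true ∧
      ∀ k ∈ PySem.List.pyRange 1 n 1, row.count k = 1) ↔
    row.Perm (PySem.List.pyRange 1 n 1) := by
  constructor
  · rintro ⟨hall, hcnt⟩
    rw [List.perm_iff_count]
    intro k
    by_cases hk : k ∈ PySem.List.pyRange 1 n 1
    · rw [hcnt k hk, List.count_eq_one_of_mem (PySem.List.nodup_pyRange_one 1 n) hk]
    · rw [List.count_eq_zero.mpr hk, List.count_eq_zero.mpr]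
      intro hkr
      exact hk (by simpa using (List.all_eq_true.mp hall) k hkr)
  · intro hp
    constructor
    · simp only [List.all_eq_true, decide_eq_true_eq]
      exact fun c hc => hp.mem_iff.mp hc
    · intro k hk
      rw [hp.count_eq, List.count_eq_one_of_mem (PySem.List.nodup_pyRange_one 1 n) hk]

lemma sorted_iff_perm (n : Int) (row : List Int) :
    PySem.List.sorted row (fun x => x) = PySem.List.pyRange 1 n 1 ↔
      row.Perm (PySem.List.pyRange 1 n 1) := by
  constructor
  · intro h
    exact (h ▸ PySem.List.sorted_perm row (fun x => x) false).symm
  · intro hp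
    exact PySem.List.sorted_eq_of_perm_of_pairwise_lt row _ (fun x => x) hp.symm
      (PySem.List.pairwise_lt_pyRange_one 1 n)

-- one iteration of A's row loop computes B's sorted-comparison test
lemma step_eq (n : Int) (row : List Int) :
    (match fcInner (fcDict (PySem.List.pyRange 1 n 1)) row with
      | none => false
      | some d => d.values.all (fun x => x == 0)) =
    (PySem.List.sorted row (fun x => x) == PySem.List.pyRange 1 n 1) := by
  rw [fcInner_eq]
  by_cases hall : row.all (fun c => (fcDict (PySem.List.pyRange 1 n 1)).contains c) = true
  · rw [if_pos hall]
    show ((row.foldl (fun d c => d.modify c 0 (· - 1))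
        (fcDict (PySem.List.pyRange 1 n 1))).values.all (fun x => x == 0)) = _
    simp only [contains_fcDict] at hall
    have hnd0 : (fcDict (PySem.List.pyRange 1 n 1)).keys.Nodup := by
      unfold fcDict
      exact PySem.Dict.nodup_keys_foldl_insert _ _ _ (by simp)
    have hnd : (row.foldl (fun d c => d.modify c 0 (· - 1)) (fcDict (PySem.List.pyRange 1 n 1))).keys.Nodup :=
      PySem.Dict.nodup_keys_foldl_modify_key row (fun x => x) 0 (fun _ _ => (· - 1)) _ hnd0
    rw [Bool.eq_iff_iff]
    rw [PySem.Dict.values_eq_map_keys _ hnd 0]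
    simp only [List.all_map, List.all_eq_true, Function.comp, beq_iff_eq]
    rw [sorted_iff_perm, ← perm_iff]
    constructor
    · intro h
      refine ⟨hall, fun k hk => ?_⟩
      have hkk : k ∈ (row.foldl (fun d c => d.modify c 0 (· - 1)) (fcDict (PySem.List.pyRange 1 n 1))).keys := by
        rw [← PySem.Dict.contains_iff_mem_keys, contains_foldl_sub, contains_fcDict]
        simp [hk]
      have := h k hkk
      rw [getD_foldl_sub, getD_fcDict, if_pos hk] at this
      omega
    · rintro ⟨-, hcnt⟩ k hkk
      rw [← PySem.Dict.contains_iff_mem_keys, contains_foldl_sub, contains_fcDict] at hkk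
      rw [getD_foldl_sub, getD_fcDict]
      have hkt : k ∈ PySem.List.pyRange 1 n 1 := by
        rcases Bool.or_eq_true_iff.mp hkk with h | h
        · exact by simpa using (List.all_eq_true.mp hall) k (by simpa using h)
        · simpa using h
      rw [if_pos hkt, hcnt k hkt]
      norm_num
  · rw [if_neg hall]
    simp only [contains_fcDict, List.all_eq_true, decide_eq_true_eq, not_forall] at hall
    obtain ⟨c, hc, hct⟩ := hall
    symm
    rw [beq_eq_false_iff_ne]
    intro h
    exact hct (((sorted_iff_perm n row).mp h).mem_iff.mp hc)

-- A's row loop in closed form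
lemma fcRowsCheck_eq (n : Int) (rows : List (List Int)) :
    fcRowsCheck (PySem.List.pyRange 1 n 1) rows =
      if rows.all (fun r => PySem.List.sorted r (fun x => x) == PySem.List.pyRange 1 n 1)
      then none else some "INVALID" := by
  induction rows with
  | nil => simp [fcRowsCheck]
  | cons row rest ih =>
    simp only [fcRowsCheck, List.all_cons]
    have h := step_eq n row
    cases hi : fcInner (fcDict (PySem.List.pyRange 1 n 1)) row with
    | none =>
      rw [hi] at h
      simp [← h]
    | some d =>
      rw [hi] at h
      simp only at h
      cases hv : d.values.all (fun x => x == 0) with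
      | false => rw [hv] at h; simp [hv, ← h]
      | true => rw [hv] at h; simp [hv, ← h, ih]

theorem fun_challenge_eq_alt (mat : List (List Int)) :
    fun_challenge mat = fun_challenge_alt mat := by
  unfold fun_challenge fun_challenge_alt
  simp only [PySem.List.foldl_append_singleton, List.nil_append]
  rw [fcRowsCheck_eq, fcRowsCheck_eq]
  cases hr : mat.all (fun r => PySem.List.sorted r (fun x => x) ==
      PySem.List.pyRange 1 ((((PySem.List.pyGet? mat 0).getD []).length : Int) + 1) 1) <;>
    cases hc : (pyZipStar mat).all (fun r => PySem.List.sorted r (fun x => x) ==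
      PySem.List.pyRange 1 ((((PySem.List.pyGet? mat 0).getD []).length : Int) + 1) 1) <;>
    simp

-- ===== VERDICT (by name: the statement is the Claim_ definition above) =====
theorem fun_challenge_spec : Claim_equal_fun_challenge := by
  intro mat _ _
  unfold Spec_fun_challenge
  exact fun_challenge_eq_alt mat
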